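-- pv_equiv track=rewrite | github.com/kohanyirobert/advent-of-code-2016 | 06/main.py | get_frequency_maps
-- ===== SOURCE A (Python) =====
-- def get_frequency_maps(messages):
--     frequency_maps = None
--     for message in messages:
--         size = len(message)
--         if frequency_maps is None:
--             frequency_maps = [{} for _ in range(size)]
--         for i in range(size):
--             char = message[i]
--             frequency_map = frequency_maps[i]
--             if char not in frequency_map:
--                 frequency_map[char] = 1
--             else:
--                 frequency_map[char] += 1
--     return frequency_maps
-- ===== SOURCE B (Python) =====
-- def get_frequency_maps(messages):
--     if not messages:
--         return []
--     result = []
--     for i in range(len(messages[0])):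
--         fm = {}
--         for message in messages:
--             if i < len(message):
--                 c = message[i]
--                 fm[c] = fm.get(c, 0) + 1
--         result.append(fm)
--     return result
-- ===== Notes on version B (the rewrite author's own statement) =====
-- stated objective: alternative
-- what changed: B builds each column's frequency dict independently in a column-major pass (one fresh dict per column index, scanning the messages), replacing A's row-major streaming that lazily allocates all column dicts on the first message and updates every column per message.
-- outside the precondition, e.g. on get_frequency_maps([]): A returns None, B returns []; on get_frequency_maps(['a', 'bb']): A raises IndexError, B returns [{'a': 1, 'b': 1}]
import Mathlib
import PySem

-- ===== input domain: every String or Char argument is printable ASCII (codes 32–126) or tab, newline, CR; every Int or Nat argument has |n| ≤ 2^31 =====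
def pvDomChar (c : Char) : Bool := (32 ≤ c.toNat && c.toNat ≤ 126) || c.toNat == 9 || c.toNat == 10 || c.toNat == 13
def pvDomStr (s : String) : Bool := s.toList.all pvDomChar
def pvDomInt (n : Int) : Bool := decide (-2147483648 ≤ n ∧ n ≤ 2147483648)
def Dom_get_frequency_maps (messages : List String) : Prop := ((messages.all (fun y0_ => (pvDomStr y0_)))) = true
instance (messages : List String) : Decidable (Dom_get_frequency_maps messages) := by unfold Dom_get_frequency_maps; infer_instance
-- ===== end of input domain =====

-- B replaces A's row-major streaming over all columns (with a None-sentinel lazy init) by a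
-- column-major pass that builds each column's dict independently; objective: alternative decomposition.

-- ===== PORT A =====
-- A's dict update: `if char not in fm: fm[char] = 1 else: fm[char] += 1`
def pvBump (fm : PySem.Dict String Int) (c : String) : PySem.Dict String Int :=
  if fm.contains c = false then fm.insert c 1 else fm.modify c 0 (· + 1)

-- A's inner loop `for i in range(size): …` updating frequency_maps in place
def pvInnerA (message : String) (fms : List (PySem.Dict String Int)) :
    List (PySem.Dict String Int) :=
  (PySem.List.pyRange 0 (PySem.Str.len message) 1).foldl (fun fms i =>
    match PySem.Str.pyGet? message i, PySem.List.pyGet? fms i with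
    | some c, some fm => PySem.List.pySetD fms i (pvBump fm (String.ofList [c]))
    | _, _ => fms      -- frequency_maps[i] raises IndexError in Python; excluded by Pre_
    ) fms

def get_frequency_maps (messages : List String) : List (List (String × Int)) :=
  match messages.foldl (fun acc message =>
      let fms := match acc with
        | none => List.replicate (PySem.Str.len message).toNat PySem.Dict.empty  -- [{} for _ in range(size)]
        | some f => f
      some (pvInnerA message fms)) none with
  | none => []         -- Python returns None (not a list) for messages = []; excluded by Pre_
  | some fms => fms.map (fun d => d.items)

-- ===== PORT B =====
def get_frequency_maps_alt (messages : List String) : List (List (String × Int)) :=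
  match messages with
  | [] => []
  | m0 :: _ =>
    (List.range m0.toList.length).map (fun i =>
      (messages.foldl (fun fm message =>
        if i < message.toList.length then
          let c := String.ofList [message.toList.getD i ' ']
          fm.insert c (fm.getD c 0 + 1)
        else fm) PySem.Dict.empty).items)

-- ===== PRECONDITION & SPEC =====
-- Pre_ excludes (a) messages = [], where A returns None, which is not a value of the declared
-- list type (B returns []), and (b) lists in which a later message is longer than the first,
-- where A raises IndexError (B returns the counts of the first len(messages[0]) columns).
def Pre_get_frequency_maps (messages : List String) : Prop :=
  messages ≠ [] ∧ ∀ m ∈ messages, m.toList.length ≤ (messages.headD "").toList.length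
instance (messages : List String) : Decidable (Pre_get_frequency_maps messages) := by
  unfold Pre_get_frequency_maps; infer_instance
def pvWitness_get_frequency_maps : List String := ["ab", "cb", "a"]

def Spec_get_frequency_maps (messages : List String) (out : List (List (String × Int))) : Prop :=
  out = get_frequency_maps_alt messages
instance (messages : List String) (out : List (List (String × Int))) :
    Decidable (Spec_get_frequency_maps messages out) := by
  unfold Spec_get_frequency_maps; infer_instance

-- ===== CLAIM (what is proved, stated in full; the proofs are below) =====
def Claim_equal_get_frequency_maps : Prop := ∀ (messages : List String),
  Dom_get_frequency_maps messages → Pre_get_frequency_maps messages →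
  Spec_get_frequency_maps messages (get_frequency_maps messages)

-- ===== LEMMAS AND PROOFS =====

-- one column step, as B iterates it over the messages (with pvBump in place of B's insert form)
def pvCol (j : Nat) (fm : PySem.Dict String Int) (m : String) : PySem.Dict String Int :=
  if j < m.toList.length then pvBump fm (String.ofList [m.toList.getD j ' ']) else fm

theorem pvBump_eq (fm : PySem.Dict String Int) (c : String) :
    pvBump fm c = fm.insert c (fm.getD c 0 + 1) := by
  unfold pvBump
  by_cases h : fm.contains c = false
  · rw [if_pos h, PySem.Dict.getD_of_not_contains fm (0 : Int) h]
    norm_num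
  · rw [if_neg h]
    exact PySem.Dict.ext_iff.mpr rfl

theorem pvInnerA_go (m : String) (n : Nat) (g : Nat → PySem.Dict String Int)
    (hle : m.toList.length ≤ n) :
    ∀ (d k : Nat), k + d = m.toList.length →
    (PySem.List.pyRange (k : Int) (PySem.Str.len m) 1).foldl (fun fms i =>
      match PySem.Str.pyGet? m i, PySem.List.pyGet? fms i with
      | some c, some fm => PySem.List.pySetD fms i (pvBump fm (String.ofList [c]))
      | _, _ => fms)
      ((List.range n).map (fun j => if j < k then pvCol j (g j) m else g j)) =
    (List.range n).map (fun j => pvCol j (g j) m) := by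
  intro d
  induction d with
  | zero =>
    intro k hk
    rw [PySem.List.pyRange_one_eq_nil (by rw [PySem.Str.len_eq]; omega)]
    simp only [List.foldl_nil]
    apply List.map_congr_left
    intro j _
    by_cases hj : j < k
    · rw [if_pos hj, pvCol, if_pos (by omega)]
    · rw [if_neg hj, pvCol, if_neg (by omega)]
  | succ d ih =>
    intro k hk
    have hklt : k < m.toList.length := by omega
    have hkn : k < n := by omega
    rw [PySem.List.pyRange_one_cons (by rw [PySem.Str.len_eq]; omega)]
    rw [List.foldl_cons]
    have hchar : PySem.Str.pyGet? m (k : Int) = some (m.toList[k]'hklt) := by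
      simp [List.getElem?_eq_getElem hklt]
    have hget : PySem.List.pyGet?
        ((List.range n).map (fun j => if j < k then pvCol j (g j) m else g j)) (k : Int) =
        some (g k) := by
      simp [hkn]
    rw [hchar, hget]
    have hset : PySem.List.pySetD
        ((List.range n).map (fun j => if j < k then pvCol j (g j) m else g j)) (k : Int)
        (pvBump (g k) (String.ofList [m.toList[k]'hklt])) =
        (List.range n).map (fun j => if j < k + 1 then pvCol j (g j) m else g j) := by
      rw [PySem.List.pySetD_natCast]
      apply List.ext_getElem (by simp)
      intro j hj1 hj2
      simp only [List.length_set, List.length_map, List.length_range] at hj1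
      simp only [List.getElem_set, List.getElem_map, List.getElem_range]
      by_cases hjk : k = j
      · subst hjk
        rw [if_pos rfl, if_pos (by omega), pvCol, if_pos hklt,
          List.getD_eq_getElem _ _ hklt]
      · rw [if_neg hjk]
        by_cases hjlt : j < k
        · rw [if_pos hjlt, if_pos (by omega)]
        · rw [if_neg hjlt, if_neg (by omega)]
    simp only [hset]
    have : ((k : Int) + 1) = ((k + 1 : Nat) : Int) := by push_cast; ring
    rw [this]
    exact ih (k + 1) (by omega)

theorem pvInnerA_eq (m : String) (n : Nat) (g : Nat → PySem.Dict String Int)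
    (hle : m.toList.length ≤ n) :
    pvInnerA m ((List.range n).map g) =
    (List.range n).map (fun j => pvCol j (g j) m) := by
  have h0 : ((List.range n).map g) =
      (List.range n).map (fun j => if j < 0 then pvCol j (g j) m else g j) := by
    apply List.map_congr_left; intro j _; rw [if_neg (by omega)]
  have hgo := pvInnerA_go m n g hle m.toList.length 0 (by omega)
  rw [pvInnerA, h0]
  exact_mod_cast hgo

theorem pvOuter_fold (msgs : List String) (n : Nat) (h : ∀ m ∈ msgs, m.toList.length ≤ n) :
    ∀ (g : Nat → PySem.Dict String Int),
    msgs.foldl (fun acc message =>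
      let fms := match acc with
        | none => List.replicate (PySem.Str.len message).toNat PySem.Dict.empty
        | some f => f
      some (pvInnerA message fms)) (some ((List.range n).map g)) =
    some ((List.range n).map (fun j => msgs.foldl (pvCol j) (g j))) := by
  induction msgs with
  | nil => intro g; simp
  | cons m rest ih =>
    intro g
    rw [List.foldl_cons]
    simp only []
    rw [pvInnerA_eq m n g (h m List.mem_cons_self)]
    rw [ih (fun m hm => h m (List.mem_cons_of_mem _ hm)) (fun j => pvCol j (g j) m)]
    simp [List.foldl_cons]

-- ===== VERDICT (by name: the statement is the Claim_ definition above) =====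
theorem get_frequency_maps_spec : Claim_equal_get_frequency_maps := by
  intro messages _ hpre
  unfold Spec_get_frequency_maps
  obtain ⟨hne, hall⟩ := hpre
  obtain ⟨m0, rest, rfl⟩ : ∃ m0 rest, messages = m0 :: rest := by
    cases messages with
    | nil => exact absurd rfl hne
    | cons a b => exact ⟨a, b, rfl⟩
  have hrest : ∀ m ∈ rest, m.toList.length ≤ m0.toList.length := by
    intro m hm
    simpa using hall m (List.mem_cons_of_mem _ hm)
  have hrepl : List.replicate (PySem.Str.len m0).toNat PySem.Dict.empty =
      (List.range m0.toList.length).map (fun _ => (PySem.Dict.empty : PySem.Dict String Int)) := by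
    simp [PySem.Str.len_eq]
  rw [get_frequency_maps, List.foldl_cons]
  simp only [hrepl]
  rw [pvInnerA_eq m0 m0.toList.length _ (le_refl _)]
  rw [pvOuter_fold rest m0.toList.length hrest (fun j => pvCol j PySem.Dict.empty m0)]
  rw [get_frequency_maps_alt]
  simp only [List.map_map]
  apply List.map_congr_left
  intro j _
  have hfun : (fun (fm : PySem.Dict String Int) (message : String) =>
      if j < message.toList.length then
        let c := String.ofList [message.toList.getD j ' ']
        fm.insert c (fm.getD c 0 + 1)
      else fm) = pvCol j := by
    funext fm message
    show (if j < message.toList.length then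
        let c := String.ofList [message.toList.getD j ' ']
        fm.insert c (fm.getD c 0 + 1)
      else fm) = pvCol j fm message
    rw [pvCol]
    by_cases hj : j < message.toList.length
    · rw [if_pos hj, if_pos hj, pvBump_eq]
    · rw [if_neg hj, if_neg hj]
  rw [hfun, List.foldl_cons]
  rfl
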